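-- pv_equiv track=rewrite | github.com/moonshubh/Agent_Sparrow | app/agents/unified/message_preparation.py | _split_attachment_blocks
-- ===== SOURCE A (Python) =====
-- from typing import Any, Dict, List, Optional, Tuple, TYPE_CHECKING
--
-- def _split_attachment_blocks(text: str) -> List[Tuple[str, str]]:
--     """Split combined attachment text into (name, content) blocks."""
--     lines = text.splitlines()
--     blocks: List[Tuple[str, str]] = []
--     current_name: Optional[str] = None
--     current_lines: List[str] = []
--
--     for line in lines:
--         if line.startswith("Attachment: "):
--             if current_name is not None:
--                 blocks.append(
--                     (current_name, "\n".join(current_lines).strip())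
--                 )
--             current_name = line[len("Attachment: ") :].strip() or "attachment"
--             current_lines = []
--             continue
--         current_lines.append(line)
--
--     if current_name is None:
--         content = text.strip()
--         return [("attachment", content)] if content else []
--
--     blocks.append((current_name, "\n".join(current_lines).strip()))
--     return blocks
-- ===== SOURCE B (Python) =====
-- HDR = "Attachment: "
--
--
-- def _split_attachment_blocks(text):
--     """Split combined attachment text into (name, content) blocks."""
--     lines = text.splitlines()
--     # phase 1: drop everything before the first header line
--     rest = lines
--     while rest and not rest[0].startswith(HDR):
--         rest = rest[1:]
--     if not rest:
--         content = text.strip()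
--         return [("attachment", content)] if content else []
--     # phase 2: peel off one (header, body) block per outer iteration
--     out = []
--     while rest:
--         name = rest[0][len(HDR):].strip() or "attachment"
--         rest = rest[1:]
--         body = []
--         while rest and not rest[0].startswith(HDR):
--             body.append(rest[0])
--             rest = rest[1:]
--         out.append((name, "\n".join(body).strip()))
--     return out
-- ===== Notes on version B (the rewrite author's own statement) =====
-- stated objective: alternative
-- what changed: Replaces A's single streaming state machine (Optional current_name plus a carried current_lines buffer, flushed on each header and once more after the loop) with a two-phase decomposition: first drop the prefix before the first header, then peel off one complete (header, body) block per outer iteration with an inner span over non-header lines.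
import Mathlib
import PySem

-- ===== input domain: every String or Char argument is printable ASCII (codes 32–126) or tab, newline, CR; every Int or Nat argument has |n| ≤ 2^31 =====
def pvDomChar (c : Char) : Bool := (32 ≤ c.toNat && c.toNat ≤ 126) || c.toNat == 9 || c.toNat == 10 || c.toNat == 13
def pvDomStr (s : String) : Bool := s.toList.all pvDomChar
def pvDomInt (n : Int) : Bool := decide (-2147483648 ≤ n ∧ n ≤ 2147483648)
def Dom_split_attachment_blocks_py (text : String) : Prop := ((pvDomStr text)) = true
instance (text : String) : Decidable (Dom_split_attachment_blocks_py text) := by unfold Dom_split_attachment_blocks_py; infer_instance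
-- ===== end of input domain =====

-- B replaces A's streaming state machine (Optional current_name + carried buffer, flushed on each
-- header and after the loop) with a two-phase decomposition: drop the prefix before the first
-- header, then peel off one (header, body) block per outer step; alternative, not faster.

-- ===== PORT A =====
-- one step of A's for-loop; state = (blocks, current_name, current_lines)
def aStep (st : List (String × String) × Option String × List String) (line : String) :
    List (String × String) × Option String × List String :=
  if PySem.Str.startswith line "Attachment: " then
    ((match st.2.1 with
      | some nm => st.1 ++ [(nm, PySem.Str.strip (PySem.Str.join "\n" st.2.2))]
      | none => st.1),
     some (let n := PySem.Str.strip (PySem.Str.slice line (some 12) none);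
           if n = "" then "attachment" else n),
     [])
  else
    (st.1, st.2.1, st.2.2 ++ [line])

def split_attachment_blocks_py (text : String) : List (String × String) :=
  let lines := PySem.Str.splitlines text
  let st := lines.foldl aStep ([], none, [])
  match st.2.1 with
  | none =>
      let content := PySem.Str.strip text
      if content = "" then [] else [("attachment", content)]
  | some nm => st.1 ++ [(nm, PySem.Str.strip (PySem.Str.join "\n" st.2.2))]

-- ===== PORT B =====
-- phase 1 of Source B: the while-loop dropping lines before the first header
def bSkip : List String → List String
  | [] => []
  | l :: ls => if PySem.Str.startswith l "Attachment: " then l :: ls else bSkip ls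

-- inner while-loop of Source B: collect body lines until the next header, return (body, rest)
def bTake : List String → List String × List String
  | [] => ([], [])
  | l :: ls =>
      if PySem.Str.startswith l "Attachment: " then ([], l :: ls)
      else
        let p := bTake ls
        (l :: p.1, p.2)

-- termination helper for the outer loop (the inner loop never grows the rest)
theorem bTake_rest_length : ∀ ls : List String, (bTake ls).2.length ≤ ls.length := by
  intro ls
  induction ls with
  | nil => simp [bTake]
  | cons l ls ih =>
      simp only [bTake]
      split
      · simp
      · simpa using Nat.le_succ_of_le ih

-- outer while-loop of Source B, accumulating out
def bLoop : List String → List (String × String) → List (String × String)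
  | [], out => out
  | l :: ls, out =>
      let nm := let n := PySem.Str.strip (PySem.Str.slice l (some 12) none);
                if n = "" then "attachment" else n
      let p := bTake ls
      bLoop p.2 (out ++ [(nm, PySem.Str.strip (PySem.Str.join "\n" p.1))])
termination_by ls _ => ls.length
decreasing_by exact Nat.lt_succ_of_le (bTake_rest_length ls)

def split_attachment_blocks_py_alt (text : String) : List (String × String) :=
  let lines := PySem.Str.splitlines text
  let rest := bSkip lines
  if rest = [] then
    let content := PySem.Str.strip text
    if content = "" then [] else [("attachment", content)]
  else bLoop rest []

-- ===== PRECONDITION & SPEC =====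
def Spec_split_attachment_blocks_py (text : String) (out : List (String × String)) : Prop := out = split_attachment_blocks_py_alt text
instance (text : String) (out : List (String × String)) : Decidable (Spec_split_attachment_blocks_py text out) := by unfold Spec_split_attachment_blocks_py; infer_instance

-- ===== CLAIM (what is proved, stated in full; the proofs are below) =====
def Claim_equal_split_attachment_blocks_py : Prop := ∀ (text : String), Dom_split_attachment_blocks_py text → Spec_split_attachment_blocks_py text (split_attachment_blocks_py text)

-- ===== LEMMAS AND PROOFS =====

-- bLoop's accumulator distributes
theorem bLoop_acc (n : Nat) : ∀ (r : List String) (out : List (String × String)),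
    r.length ≤ n → bLoop r out = out ++ bLoop r [] := by
  induction n with
  | zero =>
      intro r out h
      have : r = [] := List.eq_nil_of_length_eq_zero (Nat.le_zero.mp h)
      subst this; simp [bLoop]
  | succ n ih =>
      intro r out h
      match r with
      | [] => simp [bLoop]
      | l :: ls =>
          have hl : (bTake ls).2.length ≤ n := by
            have := bTake_rest_length ls
            simp at h; omega
          rw [bLoop, bLoop]
          simp only [List.nil_append]
          conv_rhs => rw [ih _ _ hl]
          rw [ih _ _ hl]
          simp

-- A's fold on a header-free suffix keeps the name none and buffers the lines
theorem aFold_skip_nil : ∀ (ls : List String) (c : List String),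
    bSkip ls = [] →
    List.foldl aStep ([], none, c) ls = ([], none, c ++ ls) := by
  intro ls
  induction ls with
  | nil => intro c _; simp
  | cons l ls ih =>
      intro c h
      by_cases hl : PySem.Str.startswith l "Attachment: " = true
      · rw [bSkip, if_pos hl] at h
        exact absurd h (by simp)
      · rw [bSkip, if_neg hl] at h
        rw [List.foldl_cons, aStep, if_neg hl]
        rw [ih _ h]
        simp

-- A's fold skips to the first header exactly as bSkip does
theorem aFold_skip_cons : ∀ (ls : List String) (c : List String) (l : String) (t : List String),
    bSkip ls = l :: t →
    List.foldl aStep ([], none, c) ls =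
      List.foldl aStep ([],
        some (let n := PySem.Str.strip (PySem.Str.slice l (some 12) none);
              if n = "" then "attachment" else n), []) t := by
  intro ls
  induction ls with
  | nil => intro c l t h; simp [bSkip] at h
  | cons x ls ih =>
      intro c l t h
      by_cases hx : PySem.Str.startswith x "Attachment: " = true
      · rw [bSkip, if_pos hx] at h
        cases h
        rw [List.foldl_cons, aStep, if_pos hx]
      · rw [bSkip, if_neg hx] at h
        rw [List.foldl_cons, aStep, if_neg hx]
        exact ih _ _ _ h

-- main invariant: once a header has been seen, A's remaining fold ends with some name,
-- and flushing the final block yields the pending block followed by B's outer loop output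
theorem aFold_main : ∀ (ls : List String) (nm : String) (c : List String) (b : List (String × String)),
    ∃ bl nm' cl, List.foldl aStep (b, some nm, c) ls = (bl, some nm', cl) ∧
      bl ++ [(nm', PySem.Str.strip (PySem.Str.join "\n" cl))] =
        b ++ [(nm, PySem.Str.strip (PySem.Str.join "\n" (c ++ (bTake ls).1)))] ++ bLoop (bTake ls).2 [] := by
  intro ls
  induction ls with
  | nil =>
      intro nm c b
      exact ⟨b, nm, c, rfl, by simp [bTake, bLoop]⟩
  | cons l ls ih =>
      intro nm c b
      by_cases hl : PySem.Str.startswith l "Attachment: " = true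
      · obtain ⟨bl, nm', cl, h1, h2⟩ := ih
          (let n := PySem.Str.strip (PySem.Str.slice l (some 12) none);
           if n = "" then "attachment" else n)
          [] (b ++ [(nm, PySem.Str.strip (PySem.Str.join "\n" c))])
        refine ⟨bl, nm', cl, ?_, ?_⟩
        · rw [List.foldl_cons, aStep, if_pos hl]
          exact h1
        · rw [h2, bTake, if_pos hl, bLoop]
          simp only [List.nil_append]
          conv_rhs => rw [bLoop_acc ((bTake ls).2.length) _ _ (le_refl _)]
          simp
      · obtain ⟨bl, nm', cl, h1, h2⟩ := ih nm (c ++ [l]) b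
        refine ⟨bl, nm', cl, ?_, ?_⟩
        · rw [List.foldl_cons, aStep, if_neg hl]
          exact h1
        · rw [h2, bTake, if_neg hl]
          simp

-- ===== VERDICT (by name: the statement is the Claim_ definition above) =====
theorem split_attachment_blocks_py_spec : Claim_equal_split_attachment_blocks_py := by
  intro text _
  unfold Spec_split_attachment_blocks_py split_attachment_blocks_py split_attachment_blocks_py_alt
  dsimp only
  cases h : bSkip (PySem.Str.splitlines text) with
  | nil =>
      rw [aFold_skip_nil _ _ h]
      simp
  | cons l t =>
      rw [aFold_skip_cons _ _ _ _ h]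
      rw [if_neg (by simp : ¬ (l :: t = []))]
      obtain ⟨bl, nm', cl, h1, h2⟩ := aFold_main t
        (if PySem.Str.strip (PySem.Str.slice l (some 12) none) = "" then "attachment"
         else PySem.Str.strip (PySem.Str.slice l (some 12) none)) [] []
      rw [h1]
      dsimp only
      rw [bLoop]
      rw [bLoop_acc ((bTake t).2.length) _ _ (le_refl _)]
      rw [h2]
      simp
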